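-- pv_equiv track=rewrite | github.com/skerishKang/49-padiem-rnd | modules/text_processor/run.py | count_vowel_groups
-- ===== SOURCE A (Python) =====
-- import unicodedata
--
-- def count_vowel_groups(text: str, vowels: str) -> int:
--     lowered = unicodedata.normalize("NFKD", text.lower())
--     count = 0
--     prev_vowel = False
--     for ch in lowered:
--         if ch in vowels:
--             if not prev_vowel:
--                 count += 1
--             prev_vowel = True
--         else:
--             prev_vowel = False
--     return count
-- ===== SOURCE B (Python) =====
-- import unicodedata
--
-- def count_vowel_groups(text: str, vowels: str) -> int:
--     # number of maximal vowel runs = (#vowel characters) - (#adjacent vowel-vowel pairs)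
--     lowered = unicodedata.normalize("NFKD", text.lower())
--     mask = [c in vowels for c in lowered]
--     vowel_chars = sum(mask)
--     adjacent_pairs = sum(1 for a, b in zip(mask, mask[1:]) if a and b)
--     return vowel_chars - adjacent_pairs
-- ===== Notes on version B (the rewrite author's own statement) =====
-- stated objective: alternative
-- what changed: Replaces A's stateful prev_vowel run-detection loop with an arithmetic identity: build the vowel-membership mask and return (#vowel characters) minus (#adjacent vowel-vowel pairs), which equals the number of maximal vowel runs.
import Mathlib
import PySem

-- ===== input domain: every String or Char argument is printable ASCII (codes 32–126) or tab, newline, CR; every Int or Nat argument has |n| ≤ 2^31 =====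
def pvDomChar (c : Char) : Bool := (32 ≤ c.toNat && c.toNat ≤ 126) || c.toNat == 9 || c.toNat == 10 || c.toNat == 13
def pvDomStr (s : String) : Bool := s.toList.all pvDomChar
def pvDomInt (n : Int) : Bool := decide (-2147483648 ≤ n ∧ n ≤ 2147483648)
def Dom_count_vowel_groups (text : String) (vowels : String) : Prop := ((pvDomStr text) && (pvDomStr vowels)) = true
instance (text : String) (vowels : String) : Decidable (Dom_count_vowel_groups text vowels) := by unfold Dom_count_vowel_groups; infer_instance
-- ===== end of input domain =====

-- B replaces A's stateful prev_vowel run-detection loop by the arithmetic identity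
-- runs = (#vowel characters) - (#adjacent vowel-vowel pairs); same cost, different algorithm.

-- ===== PORT A =====
-- NFKD normalization is the identity on the printable-ASCII domain these theorems cover,
-- so it is omitted on both sides (the ports are exact on Dom).
def cvgLoop (vowels : List Char) : List Char → Int → Bool → Int
  | [], count, _ => count
  | ch :: rest, count, prev =>
    if vowels.contains ch then
      cvgLoop vowels rest (if ¬ prev then count + 1 else count) true
    else
      cvgLoop vowels rest count false

def count_vowel_groups (text : String) (vowels : String) : Int :=
  cvgLoop vowels.toList (PySem.Str.lower text).toList 0 false

-- ===== PORT B =====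
-- mask = [c in vowels for c in lowered]; sum(mask); sum over zip(mask, mask[1:]) of a and b
def cvgMask (vowels : List Char) (l : List Char) : List Bool :=
  l.map (fun c => vowels.contains c)

def cvgSum (m : List Bool) : Int :=
  m.foldl (fun a b => a + (if b then 1 else 0)) 0

def cvgAdj (m : List Bool) : Int :=
  (m.zip m.tail).foldl (fun a p => a + (if p.1 && p.2 then 1 else 0)) 0

def count_vowel_groups_alt (text : String) (vowels : String) : Int :=
  let mask := cvgMask vowels.toList (PySem.Str.lower text).toList
  cvgSum mask - cvgAdj mask

-- ===== PRECONDITION & SPEC =====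
def Spec_count_vowel_groups (text : String) (vowels : String) (out : Int) : Prop := out = count_vowel_groups_alt text vowels
instance (text : String) (vowels : String) (out : Int) : Decidable (Spec_count_vowel_groups text vowels out) := by unfold Spec_count_vowel_groups; infer_instance

-- ===== CLAIM (what is proved, stated in full; the proofs are below) =====
def Claim_equal_count_vowel_groups : Prop := ∀ (text : String) (vowels : String), Dom_count_vowel_groups text vowels → Spec_count_vowel_groups text vowels (count_vowel_groups text vowels)

-- ===== LEMMAS AND PROOFS =====

-- recursive characterizations of B's two folds
def sumT : List Bool → Int
  | [] => 0
  | b :: m => (if b then 1 else 0) + sumT m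

def pairsTT : List Bool → Int
  | [] => 0
  | [_] => 0
  | a :: b :: m => (if a && b then 1 else 0) + pairsTT (b :: m)

theorem foldl_add_init {α : Type} (f : α → Int) :
    ∀ (l : List α) (c : Int), l.foldl (fun a x => a + f x) c = c + l.foldl (fun a x => a + f x) 0 := by
  intro l
  induction l with
  | nil => intro c; simp
  | cons x l ih =>
    intro c
    simp only [List.foldl_cons]
    rw [ih (c + f x), ih (0 + f x)]
    ring

theorem cvgSum_eq_sumT : ∀ m : List Bool, cvgSum m = sumT m := by
  intro m
  induction m with
  | nil => rfl
  | cons b m ih =>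
    simp only [cvgSum, List.foldl_cons] at *
    rw [foldl_add_init (fun b => if b then (1:Int) else 0) m (0 + if b then 1 else 0), ih]
    simp [sumT]

theorem cvgAdj_eq_pairsTT : ∀ m : List Bool, cvgAdj m = pairsTT m := by
  intro m
  induction m with
  | nil => rfl
  | cons a m ih =>
    cases m with
    | nil => rfl
    | cons b m' =>
      simp only [cvgAdj, List.tail_cons, List.zip_cons_cons, List.foldl_cons] at *
      rw [foldl_add_init (fun p : Bool × Bool => if p.1 && p.2 then (1:Int) else 0) _
        (0 + if a && b then 1 else 0), ih]
      simp [pairsTT]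

theorem pairsTT_false_cons : ∀ m : List Bool, pairsTT (false :: m) = pairsTT m := by
  intro m
  cases m with
  | nil => rfl
  | cons b m' => simp [pairsTT]

-- A's loop computed in terms of the mask: starts counted so far plus (#trues − #TT pairs of prev::mask)
theorem cvgLoop_eq (v : List Char) :
    ∀ (l : List Char) (count : Int) (prev : Bool),
      cvgLoop v l count prev = count + sumT (cvgMask v l) - pairsTT (prev :: cvgMask v l) := by
  intro l
  induction l with
  | nil =>
    intro count prev
    simp [cvgLoop, cvgMask, sumT, pairsTT]
  | cons c rest ih =>
    intro count prev
    cases hb : v.contains c with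
    | true =>
      simp only [cvgLoop, hb, if_true, cvgMask, List.map_cons]
      rw [ih]
      simp only [cvgMask] at *
      cases prev <;> simp [sumT, pairsTT] <;> try ring
    | false =>
      simp only [cvgLoop, hb, Bool.false_eq_true, if_false, cvgMask, List.map_cons]
      rw [ih]
      simp only [cvgMask] at *
      cases prev <;> simp [sumT, pairsTT, pairsTT_false_cons]

-- ===== VERDICT (by name: the statement is the Claim_ definition above) =====
theorem count_vowel_groups_spec : Claim_equal_count_vowel_groups := by
  intro text vowels _
  unfold Spec_count_vowel_groups count_vowel_groups count_vowel_groups_alt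
  rw [cvgLoop_eq]
  show _ = cvgSum (cvgMask vowels.toList (PySem.Str.lower text).toList)
      - cvgAdj (cvgMask vowels.toList (PySem.Str.lower text).toList)
  rw [cvgSum_eq_sumT, cvgAdj_eq_pairsTT, pairsTT_false_cons]
  ring
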